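-- pv_equiv track=rewrite | github.com/Pritz69/GFG_POTD | Smaller_Sum.py | smallerSum
-- ===== SOURCE A (Python) =====
-- from typing import List
--
-- def smallerSum(n : int, arr : List[int]) -> List[int]:
--     # code here
--     d=dict()
--     a=arr.copy()
--     a.sort()
--     s=0
--     ans=[]
--     for i in range(n):
--         if a[i] not in d:
--             d[a[i]]=s
--         s+=a[i]
--     for i in arr:
--         ans.append(d[i])
--     return ans
-- ===== SOURCE B (Python) =====
-- from typing import List
--
-- def smallerSum(n : int, arr : List[int]) -> List[int]:
--     if not 0 <= n <= len(arr):
--         raise ValueError("n is not a valid size for arr")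
--     return [sum(x for x in arr if x < v) for v in arr]
-- ===== Notes on version B (the rewrite author's own statement) =====
-- stated objective: simpler
-- what changed: B validates n as a size (0 <= n <= len(arr)) and then returns the direct one-line definition — for each element the sum of the strictly smaller elements — replacing A's sort + first-occurrence prefix-sum dictionary + lookup pass.
-- outside the precondition, e.g. on smallerSum(-1, []): A returns [], B raises ValueError
import Mathlib
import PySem

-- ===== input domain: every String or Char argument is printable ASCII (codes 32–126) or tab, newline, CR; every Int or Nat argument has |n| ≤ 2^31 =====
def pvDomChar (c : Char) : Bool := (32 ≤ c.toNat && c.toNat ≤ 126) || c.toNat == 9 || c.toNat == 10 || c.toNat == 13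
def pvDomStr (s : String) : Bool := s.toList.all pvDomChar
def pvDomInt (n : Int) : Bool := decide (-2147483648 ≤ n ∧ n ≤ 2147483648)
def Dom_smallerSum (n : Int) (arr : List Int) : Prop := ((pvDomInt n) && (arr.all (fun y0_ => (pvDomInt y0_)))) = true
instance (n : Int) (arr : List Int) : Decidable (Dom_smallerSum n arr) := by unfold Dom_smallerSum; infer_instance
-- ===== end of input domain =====

-- B replaces A's sort + first-occurrence prefix-sum dictionary + lookup pass by the direct
-- definition (per element, sum of the strictly smaller elements): simpler, not faster.

-- ===== PORT A =====
-- the body of A's first loop: 'if a[i] not in d: d[a[i]] = s' then 's += a[i]'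
def pvStepA (st : PySem.Dict Int Int × Int) (v : Int) : PySem.Dict Int Int × Int :=
  (if st.1.contains v then st.1 else st.1.insert v st.2, st.2 + v)

def smallerSum (n : Int) (arr : List Int) : List Int :=
  let a := PySem.List.sorted arr (fun x => x) false
  let st := (PySem.List.pyRange 0 n 1).foldl
      (fun st i => pvStepA st (PySem.List.pyGetD a i 0)) (PySem.Dict.empty, 0)
  arr.map (fun i => st.1.getD i 0)

-- ===== PORT B =====
def smallerSum_alt (n : Int) (arr : List Int) : List Int :=
  -- Source B raises ValueError on this branch; it lies outside Pre_, [] stands in for the raise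
  if ¬ (0 ≤ n ∧ n ≤ (arr.length : Int)) then []
  else arr.map (fun v => (arr.filter (fun x => decide (x < v))).sum)

-- ===== PRECONDITION & SPEC =====
-- Pre_ is where A returns and n is a valid size: A raises IndexError when n > len(arr) and KeyError
-- when some value's first occurrence in the sorted copy (= its count of strictly smaller elements)
-- is at index ≥ n; Pre_ also excludes negative n, which is not a size — B raises there, while A
-- returns [] for negative n exactly when arr is empty.
def Pre_smallerSum (n : Int) (arr : List Int) : Prop :=
  0 ≤ n ∧ n ≤ (arr.length : Int) ∧ ∀ v ∈ arr, ((arr.countP (fun x => decide (x < v)) : Int) < n)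
instance (n : Int) (arr : List Int) : Decidable (Pre_smallerSum n arr) := by
  unfold Pre_smallerSum; infer_instance

def pvWitness_smallerSum : Int × List Int := (3, [2, 1, 2])

def Spec_smallerSum (n : Int) (arr : List Int) (out : List Int) : Prop := out = smallerSum_alt n arr
instance (n : Int) (arr : List Int) (out : List Int) : Decidable (Spec_smallerSum n arr out) := by
  unfold Spec_smallerSum; infer_instance

-- ===== CLAIM (what is proved, stated in full; the proofs are below) =====
def Claim_equal_smallerSum : Prop := ∀ (n : Int) (arr : List Int), Dom_smallerSum n arr → Pre_smallerSum n arr → Spec_smallerSum n arr (smallerSum n arr)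

-- ===== LEMMAS AND PROOFS =====

-- in a sorted list p ++ v :: t with v ∉ p, the elements strictly below v are exactly p
lemma pv_filter_eq_prefix (p t : List Int) (v : Int)
    (hs : (p ++ v :: t).Pairwise (· ≤ ·)) (hv : v ∉ p) :
    (p ++ v :: t).filter (fun x => decide (x < v)) = p := by
  rw [List.filter_append]
  have hsp := List.pairwise_append.1 hs
  have h1 : p.filter (fun x => decide (x < v)) = p := by
    apply List.filter_eq_self.mpr
    intro x hx
    have hle : x ≤ v := hsp.2.2 x hx v (by simp)
    have hne : x ≠ v := fun h => hv (h ▸ hx)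
    simp only [decide_eq_true_eq]; omega
  have h2 : (v :: t).filter (fun x => decide (x < v)) = [] := by
    apply List.filter_eq_nil_iff.mpr
    intro x hx
    have hge : v ≤ x := by
      rcases List.mem_cons.1 hx with h | h
      · omega
      · exact (List.pairwise_cons.1 hsp.2.1).1 x h
    simp only [decide_eq_true_eq]; omega
  rw [h1, h2, List.append_nil]

-- invariant of A's first loop over a sorted list a = processed ++ remaining
lemma pv_loopA_inv (a : List Int) (ha : a.Pairwise (· ≤ ·)) :
    ∀ (t p : List Int) (d : PySem.Dict Int Int) (s : Int),
      a = p ++ t → s = p.sum →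
      (∀ v, d.get? v = if v ∈ p then some ((a.filter (fun x => decide (x < v))).sum) else none) →
      ∀ v, (t.foldl pvStepA (d, s)).1.get? v =
        if v ∈ a then some ((a.filter (fun x => decide (x < v))).sum) else none := by
  intro t
  induction t with
  | nil =>
    intro p d s hpt hs hd v
    rw [List.append_nil] at hpt
    subst hpt
    simpa using hd v
  | cons w t' ih =>
    intro p d s hpt hs hd v
    simp only [List.foldl_cons]
    by_cases hw : w ∈ p
    · have hcont : d.contains w = true := by
        rw [PySem.Dict.contains_eq_isSome_get?, hd w, if_pos hw]; rfl
      have hstep : pvStepA (d, s) w = (d, s + w) := by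
        simp [pvStepA, hcont]
      rw [hstep]
      refine ih (p ++ [w]) d (s + w) ?_ ?_ ?_ v
      · rw [hpt]; simp
      · simp [hs]
      · intro u
        rw [hd u]
        have hiff : u ∈ p ++ [w] ↔ u ∈ p := by
          simp only [List.mem_append, List.mem_singleton]
          constructor
          · rintro (h | rfl)
            · exact h
            · exact hw
          · exact Or.inl
        simp only [hiff]
    · have hcont : d.contains w = false := by
        rw [PySem.Dict.contains_eq_isSome_get?, hd w, if_neg hw]; rfl
      have hstep : pvStepA (d, s) w = (d.insert w s, s + w) := by
        simp [pvStepA, hcont]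
      rw [hstep]
      refine ih (p ++ [w]) (d.insert w s) (s + w) ?_ ?_ ?_ v
      · rw [hpt]; simp
      · simp [hs]
      · intro u
        rw [PySem.Dict.get?_insert, hd u]
        by_cases h : u = w
        · subst h
          have hf : a.filter (fun x => decide (x < u)) = p := by
            rw [hpt]; exact pv_filter_eq_prefix p t' u (hpt ▸ ha) hw
          simp [hf, hs, hw]
        · simp only [if_neg h]
          have hiff : u ∈ p ++ [w] ↔ u ∈ p := by
            simp [List.mem_append, h]
          simp only [hiff]

-- foldl over List.range with getD = foldl over the prefix
lemma pv_foldl_range_getD {σ : Type} (f : σ → Int → σ) (a : List Int) :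
    ∀ (m : Nat), m ≤ a.length → ∀ (init : σ),
      (List.range m).foldl (fun st k => f st (a.getD k 0)) init = (a.take m).foldl f init := by
  intro m
  induction m with
  | zero => intro _ init; simp
  | succ m ih =>
    intro hm init
    have hm' : m < a.length := by omega
    rw [List.range_succ, List.foldl_append, ih (by omega) init]
    have ht : a.take (m + 1) = a.take m ++ [a[m]] := by
      rw [List.take_add_one, List.getElem?_eq_getElem hm']; rfl
    rw [ht, List.foldl_append]
    simp [List.getD_eq_getElem?_getD, List.getElem?_eq_getElem hm']

-- the port's pyRange/pyGetD loop is the fold of pvStepA over the first n sorted elements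
lemma pv_foldA_take (a : List Int) (n : Int) (hn : n ≤ (a.length : Int)) :
    (PySem.List.pyRange 0 n 1).foldl
        (fun st i => pvStepA st (PySem.List.pyGetD a i 0)) (PySem.Dict.empty, 0)
      = (a.take n.toNat).foldl pvStepA (PySem.Dict.empty, 0) := by
  rw [PySem.List.pyRange_one, List.foldl_map]
  have hm : ((n : Int) - 0).toNat = n.toNat := by omega
  rw [hm]
  simp only [zero_add, PySem.List.pyGetD_natCast]
  exact pv_foldl_range_getD pvStepA a n.toNat (by omega) _

theorem smallerSum_spec : Claim_equal_smallerSum := by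
  intro n arr _ hpre
  unfold Spec_smallerSum smallerSum smallerSum_alt
  dsimp only
  obtain ⟨h0, hn, hcnt⟩ := hpre
  rw [if_neg (by omega : ¬ ¬ (0 ≤ n ∧ n ≤ (arr.length : Int)))]
  set a := PySem.List.sorted arr (fun x => x) false with hadef
  have hperm : a.Perm arr := PySem.List.sorted_perm arr (fun x => x) false
  have hlen : a.length = arr.length := hperm.length_eq
  have ha : a.Pairwise (· ≤ ·) := by
    have := PySem.List.sorted_pairwise arr (fun x => x)
    simpa using this
  have hna : n ≤ (a.length : Int) := by rw [hlen]; exact hn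
  rw [pv_foldA_take a n hna]
  set m := n.toNat with hmdef
  have hmlen : m ≤ a.length := by omega
  set u := a.take m with hudef
  have hu : a = u ++ a.drop m := (List.take_append_drop m a).symm
  have hup : u.Pairwise (· ≤ ·) := ha.sublist (List.take_sublist m a)
  have hd := pv_loopA_inv u hup u [] PySem.Dict.empty 0 (by simp) (by simp)
      (by intro v; simp [PySem.Dict.get?_empty])
  apply List.map_congr_left
  intro v hv
  -- v is in the first n sorted elements
  have hva : v ∈ a := hperm.mem_iff.mpr hv
  have hcv : ((arr.countP (fun x => decide (x < v)) : Int)) < n := hcnt v hv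
  have hcva : a.countP (fun x => decide (x < v)) = arr.countP (fun x => decide (x < v)) :=
    hperm.countP_eq _
  have hvu : v ∈ u := by
    by_contra hvu
    have hvd : v ∈ a.drop m := by
      rcases (List.mem_append.1 (hu ▸ hva)) with h | h
      · exact absurd h hvu
      · exact h
    have hall : ∀ x ∈ u, x < v := by
      intro x hx
      have hle : x ≤ v := by
        have := List.pairwise_append.1 (hu ▸ ha)
        exact this.2.2 x hx v hvd
      have hne : x ≠ v := fun h => hvu (h ▸ hx)
      omega
    have hcu : u.countP (fun x => decide (x < v)) = u.length := by
      rw [List.countP_eq_length]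
      intro x hx; simpa using hall x hx
    have hul : u.length = m := List.length_take_of_le hmlen
    have hle : m ≤ a.countP (fun x => decide (x < v)) := by
      calc m = u.countP (fun x => decide (x < v)) := by rw [hcu, hul]
        _ ≤ a.countP (fun x => decide (x < v)) := by
            rw [hu, List.countP_append]; omega
    have h1 : (m : Int) = n := by omega
    omega
  -- strictly smaller elements all lie in u
  have hfd : (a.drop m).filter (fun x => decide (x < v)) = [] := by
    apply List.filter_eq_nil_iff.mpr
    intro x hx
    have hle : v ≤ x := by
      have := List.pairwise_append.1 (hu ▸ ha)
      exact this.2.2 v hvu x hx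
    simp only [decide_eq_true_eq]; omega
  have hfu : (u.filter (fun x => decide (x < v))).sum
      = (arr.filter (fun x => decide (x < v))).sum := by
    have h1 : a.filter (fun x => decide (x < v)) = u.filter (fun x => decide (x < v)) := by
      conv_lhs => rw [hu]
      rw [List.filter_append, hfd, List.append_nil]
    have h2 : (a.filter (fun x => decide (x < v))).Perm (arr.filter (fun x => decide (x < v))) :=
      hperm.filter _
    rw [← h1]; exact h2.sum_eq
  have := hd v
  rw [if_pos hvu] at this
  rw [PySem.Dict.getD_eq_get?_getD, this]
  simpa using hfu
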